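-- pv_equiv track=rewrite | github.com/mtuoc/MTUOC-server | MTUOC_Postprocessor.py | insert_after
-- ===== SOURCE A (Python) =====
-- def insert_after(segment,insertposition,opentag):
--     position=0
--     num=-1
--     for token in segment:
--         if token.find("▂")>-1:
--             parts=token.split("▂")
--             try:
--                 num=int(parts[-1])
--             except:
--                 num=-1
--         if num==insertposition:
--             segment.insert(position+1,opentag)
--             break
--         position+=1
--     return(segment)
-- ===== SOURCE B (Python) =====
-- def insert_after(segment, insertposition, opentag):
--     nums = []
--     num = -1
--     for token in segment:
--         if "\u2582" in token:
--             parts = token.split("\u2582")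
--             try:
--                 num = int(parts[-1])
--             except ValueError:
--                 num = -1
--         nums.append(num)
--     try:
--         idx = nums.index(insertposition)
--     except ValueError:
--         return segment
--     segment.insert(idx + 1, opentag)
--     return segment
-- ===== Notes on version B (the rewrite author's own statement) =====
-- stated objective: alternative
-- what changed: B first builds a parallel forward-filled list of parsed position numbers, then finds the insertion point with a single nums.index lookup instead of A's fused scan with a running position counter and break.
import Mathlib
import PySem

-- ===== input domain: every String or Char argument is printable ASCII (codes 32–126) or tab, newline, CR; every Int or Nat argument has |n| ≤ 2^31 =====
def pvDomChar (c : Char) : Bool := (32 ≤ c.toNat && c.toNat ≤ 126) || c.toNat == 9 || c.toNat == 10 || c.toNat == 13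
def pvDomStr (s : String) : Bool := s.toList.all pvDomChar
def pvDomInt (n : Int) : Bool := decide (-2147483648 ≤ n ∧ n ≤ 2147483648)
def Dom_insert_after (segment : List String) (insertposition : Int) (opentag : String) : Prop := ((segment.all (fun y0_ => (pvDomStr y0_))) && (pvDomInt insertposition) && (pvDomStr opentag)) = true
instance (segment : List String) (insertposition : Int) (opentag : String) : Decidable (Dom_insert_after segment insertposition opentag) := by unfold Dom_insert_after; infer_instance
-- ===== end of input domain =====

-- B builds a parallel forward-filled list of parsed numbers and finds the insertion point
-- with one index lookup, instead of A's fused scan with a running counter and break.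
-- Both Pythons mutate `segment` in place and return it; the equivalence here is about the return value.

-- shared parsing step, identical source code in both Pythons:
-- if "▂" in token: parts = token.split("▂"); num = int(parts[-1]) or -1 on ValueError
def pvParseNum (num : Int) (token : String) : Int :=
  if PySem.Str.find token "▂" > -1 then
    match PySem.Str.split? token "▂" with
    | some parts =>
      match PySem.List.pyGet? parts (-1) with
      | some s =>
        match PySem.Int.ofStr? s with
        | some n => n
        | none => -1
      | none => -1
    | none => -1  -- unreachable: sep "▂" ≠ ""
  else num

-- ===== PORT A =====
def pvInsertLoopA (segment : List String) (insertposition : Int) (opentag : String)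
    (position num : Int) (rest : List String) : List String :=
  match rest with
  | [] => segment
  | token :: rest =>
    let num := pvParseNum num token
    if num = insertposition then PySem.List.insert segment (position + 1) opentag
    else pvInsertLoopA segment insertposition opentag (position + 1) num rest

def insert_after (segment : List String) (insertposition : Int) (opentag : String) : List String :=
  pvInsertLoopA segment insertposition opentag 0 (-1) segment

-- ===== PORT B =====
-- the forward-filled `nums` list of Source B
def pvNumsB (num : Int) (tokens : List String) : List Int :=
  match tokens with
  | [] => []
  | t :: ts =>
    let n := pvParseNum num t
    n :: pvNumsB n ts

def insert_after_alt (segment : List String) (insertposition : Int) (opentag : String) : List String :=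
  match PySem.List.index? (pvNumsB (-1) segment) insertposition with
  | some idx => PySem.List.insert segment ((idx : Int) + 1) opentag
  | none => segment

-- ===== PRECONDITION & SPEC =====
def Spec_insert_after (segment : List String) (insertposition : Int) (opentag : String) (out : List String) : Prop := out = insert_after_alt segment insertposition opentag
instance (segment : List String) (insertposition : Int) (opentag : String) (out : List String) : Decidable (Spec_insert_after segment insertposition opentag out) := by unfold Spec_insert_after; infer_instance

-- ===== CLAIM (what is proved, stated in full; the proofs are below) =====
def Claim_equal_insert_after : Prop := ∀ (segment : List String) (insertposition : Int) (opentag : String), Dom_insert_after segment insertposition opentag → Spec_insert_after segment insertposition opentag (insert_after segment insertposition opentag)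

-- ===== LEMMAS AND PROOFS =====
lemma pvInsertLoopA_eq_index (ip : Int) (tag : String) :
    ∀ (rest segment : List String) (pos num : Int),
    pvInsertLoopA segment ip tag pos num rest =
      match PySem.List.index? (pvNumsB num rest) ip with
      | some i => PySem.List.insert segment (pos + 1 + (i : Int)) tag
      | none => segment := by
  intro rest
  induction rest with
  | nil => intro segment pos num; simp [pvInsertLoopA, pvNumsB, PySem.List.index?]
  | cons t ts ih =>
    intro segment pos num
    simp only [pvInsertLoopA, pvNumsB]
    by_cases h : pvParseNum num t = ip
    · rw [if_pos h, h, PySem.List.index?_cons_self]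
      simp
    · rw [if_neg h, PySem.List.index?_cons_of_ne _ h]
      rw [ih segment (pos + 1) (pvParseNum num t)]
      cases hidx : PySem.List.index? (pvNumsB (pvParseNum num t) ts) ip with
      | none => simp
      | some i =>
        simp only [Option.map_some]
        congr 1
        push_cast
        ring

-- ===== VERDICT (by name: the statement is the Claim_ definition above) =====
theorem insert_after_spec : Claim_equal_insert_after := by
  intro segment ip tag _
  unfold Spec_insert_after insert_after insert_after_alt
  rw [pvInsertLoopA_eq_index]
  cases PySem.List.index? (pvNumsB (-1) segment) ip with
  | none => rfl
  | some i => simp; ring_nf
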